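-- pv_equiv track=rewrite | github.com/divelab/MFA | minimal_frame/nauty.py | writeperm
-- ===== SOURCE A (Python) =====
-- def putstring(s, value):
--     return s + value
--
-- def writeperm(perm, n):
--     s = ""
--     curlen = 0
--     workperm = [0] * n
--
--     for i in range(n - 1, -1, -1):
--         workperm[i] = 0
--
--     for i in range(n):
--         if workperm[i] == 0 and perm[i] != i:
--             l = i
--             intlen = len(str(l))
--             s = putstring(s, '(')
--             curlen += 1
--             while True:
--                 s = putstring(s, str(l))
--                 curlen += intlen + 1
--                 k = l
--                 l = perm[l]
--                 workperm[k] = 1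
--                 if l != i:
--                     intlen = len(str(l))
--                     s = putstring(s, ' ')
--                 else:
--                     break
--             s = putstring(s, ')')
--             curlen += 1
--
--     if curlen == 0:
--         s = putstring(s, "(1)\n")
--     else:
--         s = putstring(s, '\n')
--
--     return s
-- ===== SOURCE B (Python) =====
-- def writeperm(perm, n):
--     out = []
--     for i in range(n):
--         if perm[i] != i:
--             elems = [i]
--             mn = i
--             l = perm[i]
--             while l != i:
--                 elems.append(l)
--                 if l < mn:
--                     mn = l
--                 l = perm[l]
--             if mn == i:
--                 out.append('(' + ' '.join(map(str, elems)) + ')')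
--     return (''.join(out) + '\n') if out else '(1)\n'
-- ===== Notes on version B (the rewrite author's own statement) =====
-- stated objective: alternative
-- what changed: B drops A's visited-marking workperm array entirely: for each i it walks the cycle once, tracking the minimum element seen, and emits the cycle only when i is its minimum; cycle strings are collected in a list and joined at the end instead of threading a string/length accumulator.
-- outside the precondition, e.g. on writeperm([-1, 0], 2): A returns '(0 -1)\n', B does not finish within the time limit
import Mathlib
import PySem

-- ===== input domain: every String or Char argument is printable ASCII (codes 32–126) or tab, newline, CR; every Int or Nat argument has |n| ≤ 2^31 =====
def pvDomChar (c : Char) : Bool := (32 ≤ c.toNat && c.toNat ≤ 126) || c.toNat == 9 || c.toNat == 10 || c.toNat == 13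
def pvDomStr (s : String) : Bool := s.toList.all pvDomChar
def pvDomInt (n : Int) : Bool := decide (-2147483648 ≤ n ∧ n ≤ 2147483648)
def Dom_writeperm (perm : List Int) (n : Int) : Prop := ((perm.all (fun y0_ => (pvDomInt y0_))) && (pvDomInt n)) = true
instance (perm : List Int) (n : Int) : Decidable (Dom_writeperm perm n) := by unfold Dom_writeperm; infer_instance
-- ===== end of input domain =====

-- B replaces A's visited-marking workperm array by a min-detection walk: each nontrivial cycle is
-- emitted only when the loop index is the cycle's minimum (objective: alternative; same output).

-- ===== PORT A =====
-- strings are built on the List Char side (Lean's own String.append is kernel-opaque); the final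
-- result is wrapped with String.ofList once at the end
def pvPutstring (s v : List Char) : List Char := s ++ v

-- perm[l] (Python indexing, negative l from the end); the default 0 is never reached inside Pre_
def pvPermGetA (perm : List Int) (l : Int) : Int := (PySem.List.pyGet? perm l).getD 0

-- the inner 'while True' loop; fuel n.toNat+1 suffices inside Pre_ (a cycle has at most n elements)
def pvCycleLoopA (perm : List Int) (i : Int) :
    Nat → List Char × Int × List Int × Int × Int → List Char × Int × List Int × Int × Int
  | 0, st => st
  | fuel+1, (s, curlen, workperm, intlen, l) =>
    let s := pvPutstring s (PySem.Int.toChars l)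
    let curlen := curlen + intlen + 1
    let k := l
    let l := pvPermGetA perm l
    let workperm := PySem.List.pySetD workperm k 1
    if l ≠ i then
      pvCycleLoopA perm i fuel
        (pvPutstring s [' '], curlen, workperm, ((PySem.Int.toChars l).length : Int), l)
    else (s, curlen, workperm, intlen, l)

-- body of 'for i in range(n)': state (s, curlen, workperm)
def pvStepA (perm : List Int) (n : Int) (st : List Char × Int × List Int) (i : Int) :
    List Char × Int × List Int :=
  if PySem.List.pyGetD st.2.2 i 0 = 0 ∧ pvPermGetA perm i ≠ i then
    let s := pvPutstring st.1 ['(']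
    let c := st.2.1 + 1
    let r := pvCycleLoopA perm i (n.toNat + 1) (s, c, st.2.2, ((PySem.Int.toChars i).length : Int), i)
    (pvPutstring r.1 [')'], r.2.1 + 1, r.2.2.1)
  else st

def writeperm (perm : List Int) (n : Int) : String :=
  let workperm : List Int := List.replicate n.toNat 0        -- [0] * n
  -- for i in range(n-1, -1, -1): workperm[i] = 0
  let workperm := (PySem.List.pyRange (n-1) (-1) (-1)).foldl
      (fun w i => PySem.List.pySetD w i 0) workperm
  let st := (PySem.List.pyRange 0 n 1).foldl (pvStepA perm n) (([] : List Char), (0 : Int), workperm)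
  if st.2.1 = 0 then String.ofList (pvPutstring st.1 "(1)\n".toList)
  else String.ofList (pvPutstring st.1 ['\n'])

-- ===== PORT B =====
-- perm[l] (Python indexing); the default 0 is never reached inside Pre_
def pvPermGetB (perm : List Int) (l : Int) : Int := (PySem.List.pyGet? perm l).getD 0

-- the 'while l != i' walk collecting the cycle's elements and their minimum;
-- fuel n.toNat+1 suffices inside Pre_
def pvWalkB (perm : List Int) (i : Int) : Nat → List Int × Int × Int → List Int × Int × Int
  | 0, st => st
  | fuel+1, (elems, mn, l) =>
    if l = i then (elems, mn, l)
    else pvWalkB perm i fuel (elems ++ [l], if l < mn then l else mn, pvPermGetB perm l)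

-- '(' + ' '.join(map(str, elems)) + ')'
def pvCycleStrB (elems : List Int) : List Char :=
  ['('] ++ PySem.Chars.join [' '] (elems.map PySem.Int.toChars) ++ [')']

-- body of 'for i in range(n)': out is the list of emitted cycle strings
def pvStepB (perm : List Int) (n : Int) (out : List (List Char)) (i : Int) : List (List Char) :=
  if pvPermGetB perm i ≠ i then
    let r := pvWalkB perm i (n.toNat + 1) ([i], i, pvPermGetB perm i)
    if r.2.1 = i then out ++ [pvCycleStrB r.1] else out
  else out

def writeperm_alt (perm : List Int) (n : Int) : String :=
  let out := (PySem.List.pyRange 0 n 1).foldl (pvStepB perm n) []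
  if out.isEmpty then String.ofList "(1)\n".toList
  else String.ofList (PySem.Chars.join [] out ++ ['\n'])

-- ===== PRECONDITION & SPEC =====
-- Pre_ excludes inputs whose first n entries are not a permutation of 0..n-1 (or n outside
-- [0, len(perm)]): on those A raises IndexError or loops forever, except for stray inputs where
-- Python's negative-index wraparound closes a cycle and A returns a string while B does not
-- terminate (see claim cites).
def Pre_writeperm (perm : List Int) (n : Int) : Prop :=
  n ≤ perm.length ∧ (perm.take n.toNat).Perm ((List.range n.toNat).map (fun k : Nat => (k : Int)))
instance (perm : List Int) (n : Int) : Decidable (Pre_writeperm perm n) := by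
  unfold Pre_writeperm; infer_instance

def pvWitness_writeperm : List Int × Int := ([1, 0, 2], 3)

def Spec_writeperm (perm : List Int) (n : Int) (out : String) : Prop := out = writeperm_alt perm n
instance (perm : List Int) (n : Int) (out : String) : Decidable (Spec_writeperm perm n out) := by
  unfold Spec_writeperm; infer_instance

-- ===== CLAIM (what is proved, stated in full; the proofs are below) =====
def Claim_equal_writeperm : Prop := ∀ (perm : List Int) (n : Int), Dom_writeperm perm n →
  Pre_writeperm perm n → Spec_writeperm perm n (writeperm perm n)

-- ===== LEMMAS AND PROOFS =====

def pvF (perm : List Int) (k : Nat) : Nat := (pvPermGetA perm (k : Int)).toNat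

def pvGood (perm : List Int) (N : Nat) : Prop :=
  N ≤ perm.length ∧
  (∀ k, k < N → pvF perm k < N ∧ pvPermGetA perm (k : Int) = (pvF perm k : Int)) ∧
  (∀ k1 k2, k1 < N → k2 < N → pvF perm k1 = pvF perm k2 → k1 = k2)

theorem pvPre_good (perm : List Int) (n : Int) (h : Pre_writeperm perm n) :
    pvGood perm n.toNat := by
  obtain ⟨hlen, hperm⟩ := h
  set N := n.toNat with hN
  have hNlen : N ≤ perm.length := by omega
  have hget : ∀ k (hk : k < N), ∃ m, m < N ∧ perm[k]'(by omega) = (m : Int) := by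
    intro k hk
    have hmem : perm[k]'(by omega) ∈ (List.range N).map (fun k : Nat => (k : Int)) := by
      have : perm[k]'(by omega) ∈ perm.take N := by
        have : (perm.take N)[k]'(by simp; omega) = perm[k]'(by omega) := List.getElem_take
        rw [← this]; exact List.getElem_mem _
      exact hperm.mem_iff.mp this
    simp only [List.mem_map, List.mem_range] at hmem
    obtain ⟨m, hm, he⟩ := hmem
    exact ⟨m, hm, he.symm⟩
  have hval : ∀ k, k < N → pvF perm k < N ∧ pvPermGetA perm (k : Int) = (pvF perm k : Int) := by
    intro k hk
    obtain ⟨m, hm, he⟩ := hget k hk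
    have hA : pvPermGetA perm (k : Int) = perm[k]'(by omega) := by
      simp [pvPermGetA, PySem.List.pyGet?_natCast, List.getElem?_eq_getElem (by omega : k < perm.length)]
    have : pvF perm k = m := by simp [pvF, hA, he]
    constructor
    · omega
    · rw [hA, he, this]
  refine ⟨hNlen, hval, ?_⟩
  intro k1 k2 h1 h2 he
  have hnd : (perm.take N).Nodup := by
    rw [hperm.nodup_iff]
    refine List.Nodup.map ?_ List.nodup_range
    intro a b h; simpa using h
  have e1 := (hval k1 h1).2
  have e2 := (hval k2 h2).2
  have : perm[k1]'(by omega) = perm[k2]'(by omega) := by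
    have hA1 : pvPermGetA perm (k1 : Int) = perm[k1]'(by omega) := by
      simp [pvPermGetA, PySem.List.pyGet?_natCast, List.getElem?_eq_getElem (by omega : k1 < perm.length)]
    have hA2 : pvPermGetA perm (k2 : Int) = perm[k2]'(by omega) := by
      simp [pvPermGetA, PySem.List.pyGet?_natCast, List.getElem?_eq_getElem (by omega : k2 < perm.length)]
    rw [← hA1, ← hA2, e1, e2, he]
  have t1 : (perm.take N)[k1]'(by simp; omega) = (perm.take N)[k2]'(by simp; omega) := by
    simpa [List.getElem_take] using this
  have := (List.Nodup.getElem_inj_iff hnd).mp t1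
  exact this

-- iterates stay below N
theorem pvIter_lt (perm : List Int) (N : Nat) (good : pvGood perm N) :
    ∀ t i, i < N → (pvF perm)^[t] i < N := by
  intro t
  induction t with
  | zero => simpa using fun i h => h
  | succ t ih =>
    intro i hi
    rw [Function.iterate_succ_apply]
    exact ih _ (good.2.1 i hi).1

theorem pvIter_cancel (perm : List Int) (N : Nat) (good : pvGood perm N) :
    ∀ a x y, x < N → y < N → (pvF perm)^[a] x = (pvF perm)^[a] y → x = y := by
  intro a
  induction a with
  | zero => simpa using fun x y _ _ h => h
  | succ a ih =>
    intro x y hx hy he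
    rw [Function.iterate_succ_apply, Function.iterate_succ_apply] at he
    have := ih _ _ (good.2.1 x hx).1 (good.2.1 y hy).1 he
    exact good.2.2 x y hx hy this

theorem pvExists_return (perm : List Int) (N : Nat) (good : pvGood perm N)
    (i : Nat) (hi : i < N) : ∃ t, 0 < t ∧ t ≤ N ∧ (pvF perm)^[t] i = i := by
  have hmaps : ∀ t ∈ Finset.range (N+1), (pvF perm)^[t] i ∈ Finset.range N := by
    intro t _
    simpa using pvIter_lt perm N good t i hi
  obtain ⟨a, ha, b, hb, hne, he⟩ :=
    Finset.exists_ne_map_eq_of_card_lt_of_maps_to (by simp) hmaps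
  simp only [Finset.mem_range] at ha hb
  rcases Nat.lt_or_ge a b with hab | hab
  · have : (pvF perm)^[a] ((pvF perm)^[b-a] i) = (pvF perm)^[a] i := by
      rw [← Function.iterate_add_apply]
      rw [show a + (b - a) = b by omega]
      exact he.symm
    have := pvIter_cancel perm N good a _ _ (pvIter_lt perm N good _ i hi) hi this
    exact ⟨b - a, by omega, by omega, this⟩
  · have hab' : b < a := by omega
    have : (pvF perm)^[b] ((pvF perm)^[a-b] i) = (pvF perm)^[b] i := by
      rw [← Function.iterate_add_apply]
      rw [show b + (a - b) = a by omega]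
      exact he
    have := pvIter_cancel perm N good b _ _ (pvIter_lt perm N good _ i hi) hi this
    exact ⟨a - b, by omega, by omega, this⟩

def pvRet (perm : List Int) (i : Nat) : Prop := ∃ t, 0 < t ∧ (pvF perm)^[t] i = i

theorem pvRet_of (perm : List Int) (N : Nat) (good : pvGood perm N) (i : Nat) (hi : i < N) :
    pvRet perm i := by
  obtain ⟨t, h1, _, h3⟩ := pvExists_return perm N good i hi
  exact ⟨t, h1, h3⟩

def pvPer (perm : List Int) (i : Nat) (h : pvRet perm i) : Nat := Nat.find h

theorem pvPer_pos (perm : List Int) (i : Nat) (h : pvRet perm i) : 0 < pvPer perm i h :=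
  (Nat.find_spec h).1

theorem pvPer_iter (perm : List Int) (i : Nat) (h : pvRet perm i) :
    (pvF perm)^[pvPer perm i h] i = i := (Nat.find_spec h).2

theorem pvPer_le (perm : List Int) (N : Nat) (good : pvGood perm N) (i : Nat) (hi : i < N)
    (h : pvRet perm i) : pvPer perm i h ≤ N := by
  obtain ⟨t, h1, h2, h3⟩ := pvExists_return perm N good i hi
  exact le_trans (Nat.find_min' h ⟨h1, h3⟩) h2

theorem pvPer_min (perm : List Int) (i : Nat) (h : pvRet perm i) (t : Nat) (ht : 0 < t)
    (hlt : t < pvPer perm i h) : (pvF perm)^[t] i ≠ i := by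
  intro he
  exact Nat.find_min h hlt ⟨ht, he⟩

theorem pvIter_mul_per (perm : List Int) (i : Nat) (h : pvRet perm i) (q : Nat) :
    (pvF perm)^[pvPer perm i h * q] i = i := by
  induction q with
  | zero => simp
  | succ q ih =>
    rw [Nat.mul_succ, Function.iterate_add_apply, pvPer_iter, ih]

theorem pvIter_mod (perm : List Int) (i : Nat) (h : pvRet perm i) (t : Nat) :
    (pvF perm)^[t] i = (pvF perm)^[t % pvPer perm i h] i := by
  conv_lhs => rw [show t = t % pvPer perm i h + pvPer perm i h * (t / pvPer perm i h) by
    rw [Nat.mod_add_div]]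
  rw [Function.iterate_add_apply, pvIter_mul_per]

def pvOrb (perm : List Int) (i : Nat) (h : pvRet perm i) : List Nat :=
  (List.range (pvPer perm i h)).map (fun t => (pvF perm)^[t] i)

theorem pvOrb_mem_iff (perm : List Int) (i : Nat) (h : pvRet perm i) (x : Nat) :
    x ∈ pvOrb perm i h ↔ ∃ t, t < pvPer perm i h ∧ (pvF perm)^[t] i = x := by
  simp only [pvOrb, List.mem_map, List.mem_range]

theorem pvSelf_mem_orb (perm : List Int) (i : Nat) (h : pvRet perm i) : i ∈ pvOrb perm i h := by
  rw [pvOrb_mem_iff]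
  exact ⟨0, pvPer_pos perm i h, rfl⟩

theorem pvOrb_lt (perm : List Int) (N : Nat) (good : pvGood perm N) (i : Nat) (hi : i < N)
    (h : pvRet perm i) (x : Nat) (hx : x ∈ pvOrb perm i h) : x < N := by
  rw [pvOrb_mem_iff] at hx
  obtain ⟨t, _, he⟩ := hx
  rw [← he]
  exact pvIter_lt perm N good t i hi

theorem pvPer_eq_of_mem (perm : List Int) (N : Nat) (good : pvGood perm N) (i : Nat) (hi : i < N)
    (h : pvRet perm i) (k : Nat) (hk : k ∈ pvOrb perm i h) (hkr : pvRet perm k) :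
    pvPer perm k hkr = pvPer perm i h := by
  rw [pvOrb_mem_iff] at hk
  obtain ⟨t, ht, he⟩ := hk
  have hret : (pvF perm)^[pvPer perm i h] k = k := by
    rw [← he, ← Function.iterate_add_apply, Nat.add_comm, Function.iterate_add_apply, pvPer_iter]
  have hle : pvPer perm k hkr ≤ pvPer perm i h :=
    Nat.find_min' hkr ⟨pvPer_pos perm i h, hret⟩
  rcases Nat.lt_or_ge (pvPer perm k hkr) (pvPer perm i h) with hlt | hge
  · exfalso
    have hkk := pvPer_iter perm k hkr
    -- f^[per k] (f^[t] i) = f^[t] i  ⇒  f^[t] (f^[per k] i) = f^[t] i  ⇒ f^[per k] i = i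
    have : (pvF perm)^[t] ((pvF perm)^[pvPer perm k hkr] i) = (pvF perm)^[t] i := by
      rw [← Function.iterate_add_apply, Nat.add_comm, Function.iterate_add_apply, he, hkk]
    have := pvIter_cancel perm N good t _ _ (pvIter_lt perm N good _ i hi) hi this
    exact pvPer_min perm i h _ (pvPer_pos perm k hkr) hlt this
  · omega

theorem pvOrb_eq_of_mem (perm : List Int) (N : Nat) (good : pvGood perm N) (i : Nat) (hi : i < N)
    (h : pvRet perm i) (k : Nat) (hk : k ∈ pvOrb perm i h) (hkr : pvRet perm k) (x : Nat) :
    x ∈ pvOrb perm k hkr ↔ x ∈ pvOrb perm i h := by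
  have hper := pvPer_eq_of_mem perm N good i hi h k hk hkr
  rw [pvOrb_mem_iff] at hk
  obtain ⟨t, ht, he⟩ := hk
  rw [pvOrb_mem_iff, pvOrb_mem_iff, hper]
  constructor
  · rintro ⟨s, hs, hse⟩
    refine ⟨(s + t) % pvPer perm i h, Nat.mod_lt _ (pvPer_pos perm i h), ?_⟩
    rw [← pvIter_mod, Function.iterate_add_apply, he, hse]
  · rintro ⟨u, hu, hue⟩
    refine ⟨(u + (pvPer perm i h - t)) % pvPer perm i h, Nat.mod_lt _ (pvPer_pos perm i h), ?_⟩
    rw [← he, ← Function.iterate_add_apply]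
    have hmod : ((u + (pvPer perm i h - t)) % pvPer perm i h + t) % pvPer perm i h = u := by
      rw [Nat.mod_add_mod, show u + (pvPer perm i h - t) + t = u + pvPer perm i h by omega,
        Nat.add_mod_right, Nat.mod_eq_of_lt hu]
    rw [pvIter_mod perm i h, hmod, hue]

theorem pvPer_one_iff (perm : List Int) (i : Nat) (h : pvRet perm i) :
    pvPer perm i h = 1 ↔ pvF perm i = i := by
  constructor
  · intro he
    have := pvPer_iter perm i h
    rw [he] at this
    simpa using this
  · intro he
    have h1 : (pvF perm)^[1] i = i := by simpa using he
    have h2 : pvPer perm i h ≤ 1 := Nat.find_min' h ⟨Nat.one_pos, h1⟩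
    have h3 := pvPer_pos perm i h
    omega

theorem pvMem_symm (perm : List Int) (N : Nat) (good : pvGood perm N) (i : Nat) (hi : i < N)
    (h : pvRet perm i) (k : Nat) (hk : k ∈ pvOrb perm i h) (hkr : pvRet perm k) :
    i ∈ pvOrb perm k hkr := by
  rw [pvOrb_eq_of_mem perm N good i hi h k hk hkr]
  exact pvSelf_mem_orb perm i h

theorem pvNontriv (perm : List Int) (N : Nat) (good : pvGood perm N) (i : Nat) (hi : i < N)
    (h : pvRet perm i) (hne : pvF perm i ≠ i) (k : Nat) (hk : k ∈ pvOrb perm i h)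
    (hkr : pvRet perm k) : pvF perm k ≠ k := by
  intro he
  have h1 : pvPer perm k hkr = 1 := (pvPer_one_iff perm k hkr).mpr he
  have h2 := pvPer_eq_of_mem perm N good i hi h k hk hkr
  have h3 : pvPer perm i h ≠ 1 := fun hc => hne ((pvPer_one_iff perm i h).mp hc)
  omega

-- foldl-min facts on Nat lists (no PySem/Mathlib lemma covers foldl Nat.min)
theorem pvFoldlMin_le_init (l : List Nat) (a : Nat) : l.foldl Nat.min a ≤ a := by
  induction l generalizing a with
  | nil => simp
  | cons x t ih =>
    simp only [List.foldl_cons]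
    exact le_trans (ih _) (Nat.min_le_left a x)

theorem pvFoldlMin_le_mem (l : List Nat) (a x : Nat) (hx : x ∈ l) : l.foldl Nat.min a ≤ x := by
  induction l generalizing a with
  | nil => simp at hx
  | cons y t ih =>
    simp only [List.foldl_cons]
    rcases List.mem_cons.mp hx with rfl | hm
    · exact le_trans (pvFoldlMin_le_init _ _) (Nat.min_le_right a x)
    · exact ih _ hm

theorem pvFoldlMin_mem_or (l : List Nat) (a : Nat) : l.foldl Nat.min a = a ∨ l.foldl Nat.min a ∈ l := by
  induction l generalizing a with
  | nil => simp
  | cons x t ih =>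
    simp only [List.foldl_cons]
    rcases ih (Nat.min a x) with he | hm
    · rcases Nat.le_or_le a x with hax | hax
      · left; rw [he]; simp only [Nat.min_def]; split_ifs <;> omega
      · right
        have hx : a.min x = x := by simp only [Nat.min_def]; split_ifs <;> omega
        rw [he, hx]; exact List.mem_cons_self
    · right; right; exact hm

def pvMin (perm : List Int) (i : Nat) (h : pvRet perm i) : Nat :=
  (pvOrb perm i h).foldl Nat.min i

theorem pvMin_le_self (perm : List Int) (i : Nat) (h : pvRet perm i) : pvMin perm i h ≤ i :=
  pvFoldlMin_le_init _ _

theorem pvMin_mem (perm : List Int) (i : Nat) (h : pvRet perm i) :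
    pvMin perm i h ∈ pvOrb perm i h := by
  rcases pvFoldlMin_mem_or (pvOrb perm i h) i with he | hm
  · rw [pvMin, he]; exact pvSelf_mem_orb perm i h
  · exact hm

theorem pvMin_le (perm : List Int) (i : Nat) (h : pvRet perm i) (x : Nat)
    (hx : x ∈ pvOrb perm i h) : pvMin perm i h ≤ x :=
  pvFoldlMin_le_mem _ _ _ hx

theorem pvMin_eq_of_mem (perm : List Int) (N : Nat) (good : pvGood perm N) (i : Nat) (hi : i < N)
    (h : pvRet perm i) (k : Nat) (hk : k ∈ pvOrb perm i h) (hkr : pvRet perm k) :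
    pvMin perm k hkr = pvMin perm i h := by
  have horb := pvOrb_eq_of_mem perm N good i hi h k hk hkr
  have h1 : pvMin perm k hkr ≤ pvMin perm i h :=
    pvMin_le perm k hkr _ ((horb _).mpr (pvMin_mem perm i h))
  have h2 : pvMin perm i h ≤ pvMin perm k hkr :=
    pvMin_le perm i h _ ((horb _).mp (pvMin_mem perm k hkr))
  omega

-- at an emit point j (pvMin j = j): membership in orb j is exactly "my cycle minimum is j"
theorem pvMem_orb_iff_min (perm : List Int) (N : Nat) (good : pvGood perm N) (j : Nat)
    (hj : j < N) (h : pvRet perm j) (hmin : pvMin perm j h = j) (k : Nat) (hk : k < N)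
    (hkr : pvRet perm k) : k ∈ pvOrb perm j h ↔ pvMin perm k hkr = j := by
  constructor
  · intro hm
    rw [pvMin_eq_of_mem perm N good j hj h k hm hkr, hmin]
  · intro hm
    have : pvMin perm k hkr ∈ pvOrb perm k hkr := pvMin_mem perm k hkr
    rw [hm] at this
    exact pvMem_symm perm N good k hk hkr j this h

-- cast bridge: pvPermGet on an orbit point
theorem pvGet_cast (perm : List Int) (N : Nat) (good : pvGood perm N) (k : Nat) (hk : k < N) :
    pvPermGetA perm (k : Int) = ((pvF perm k : Nat) : Int) := (good.2.1 k hk).2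

-- B's walk, characterized along the cycle of i
theorem pvWalkB_spec (perm : List Int) (N : Nat) (good : pvGood perm N) (i : Nat) (hi : i < N)
    (h : pvRet perm i) :
    ∀ d t fuel (E : List Int) (mn : Int), t + d = pvPer perm i h → 1 ≤ t → d ≤ fuel →
    pvWalkB perm (i : Int) fuel (E, mn, (((pvF perm)^[t] i : Nat) : Int)) =
      (E ++ (List.range d).map (fun s => (((pvF perm)^[t+s] i : Nat) : Int)),
       ((List.range d).map (fun s => (((pvF perm)^[t+s] i : Nat) : Int))).foldl
         (fun m x => if x < m then x else m) mn,
       (i : Int)) := by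
  intro d
  induction d with
  | zero =>
    intro t fuel E mn hts ht _
    have : (pvF perm)^[t] i = i := by rw [Nat.add_zero] at hts; rw [hts]; exact pvPer_iter perm i h
    rw [this]
    cases fuel with
    | zero => simp [pvWalkB]
    | succ fu => simp [pvWalkB]
  | succ d ih =>
    intro t fuel E mn hts ht hfuel
    have htlt : t < pvPer perm i h := by omega
    have hne : (pvF perm)^[t] i ≠ i := pvPer_min perm i h t (by omega) htlt
    have hnez : (((pvF perm)^[t] i : Nat) : Int) ≠ (i : Int) := by
      intro hc; exact hne (by exact_mod_cast hc)
    cases fuel with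
    | zero => omega
    | succ fu =>
      rw [pvWalkB, if_neg hnez]
      have hstep : pvPermGetB perm (((pvF perm)^[t] i : Nat) : Int)
          = (((pvF perm)^[t+1] i : Nat) : Int) := by
        have hlt := pvIter_lt perm N good t i hi
        have := pvGet_cast perm N good _ hlt
        rw [show pvPermGetB = pvPermGetA from rfl, this, Function.iterate_succ_apply']
      rw [hstep, ih (t+1) fu _ _ (by omega) (by omega) (by omega)]
      have hfun : ((fun s => (((pvF perm)^[t+s] i : Nat) : Int)) ∘ Nat.succ)
          = fun s => (((pvF perm)^[t+1+s] i : Nat) : Int) := by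
        funext s
        rw [Function.comp_apply, show t + Nat.succ s = t + 1 + s by omega]
      simp only [List.range_succ_eq_map, List.map_cons, List.map_map, hfun, Nat.add_zero,
        List.foldl_cons, List.append_assoc, List.singleton_append]

theorem pvJoinCons (sep p : List Char) (rest : List (List Char)) (h : rest ≠ []) :
    PySem.Chars.join sep (p :: rest) = p ++ sep ++ PySem.Chars.join sep rest := by
  cases rest with
  | nil => exact absurd rfl h
  | cons q r => exact PySem.Chars.join_cons_cons sep p q r

-- A's inner while-loop, characterized along the cycle of i
theorem pvCycleLoopA_spec (perm : List Int) (N : Nat) (good : pvGood perm N) (i : Nat)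
    (hi : i < N) (h : pvRet perm i) :
    ∀ d t fuel (s : List Char) (c : Int) (w : List Int) (il : Int),
      t + d = pvPer perm i h → 1 ≤ d → d ≤ fuel →
      (pvCycleLoopA perm (i : Int) fuel (s, c, w, il, (((pvF perm)^[t] i : Nat) : Int))).1 =
        s ++ PySem.Chars.join [' ']
          (((List.range d).map (fun s' => (pvF perm)^[t+s'] i)).map
            (fun k : Nat => PySem.Int.toChars (k : Int))) ∧
      (∃ e : Int, (pvCycleLoopA perm (i : Int) fuel (s, c, w, il, (((pvF perm)^[t] i : Nat) : Int))).2.1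
          = c + e ∧ il + 1 ≤ e) ∧
      (pvCycleLoopA perm (i : Int) fuel (s, c, w, il, (((pvF perm)^[t] i : Nat) : Int))).2.2.1 =
        ((List.range d).map (fun s' => (pvF perm)^[t+s'] i)).foldl
          (fun w (k : Nat) => PySem.List.pySetD w (k : Int) 1) w := by
  intro d
  induction d with
  | zero => intro _ _ _ _ _ _ _ _ h2; omega
  | succ d ih =>
    intro t fuel s c w il hts hd hfuel
    have htlt : t < pvPer perm i h := by omega
    have hstep : pvPermGetA perm (((pvF perm)^[t] i : Nat) : Int)
        = (((pvF perm)^[t+1] i : Nat) : Int) := by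
      have hlt := pvIter_lt perm N good t i hi
      rw [pvGet_cast perm N good _ hlt, Function.iterate_succ_apply']
    cases fuel with
    | zero => omega
    | succ fu =>
      rcases Nat.eq_or_lt_of_le hd with hd1 | hd2
      · -- d + 1 = 1 : last element, loop exits
        have hd0 : d = 0 := by omega
        subst hd0
        have hret : (pvF perm)^[t+1] i = i := by rw [show t + 1 = pvPer perm i h by omega]; exact pvPer_iter perm i h
        rw [pvCycleLoopA]
        simp only [pvPutstring, hstep, hret]
        rw [if_neg (by simp)]
        refine ⟨?_, ⟨il + 1, by ring_nf, le_refl _⟩, ?_⟩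
        · simp [PySem.Chars.join_singleton]
        · simp
      · -- at least two elements remain: loop continues
        have hne : (pvF perm)^[t+1] i ≠ i := pvPer_min perm i h (t+1) (by omega) (by omega)
        have hnez : (((pvF perm)^[t+1] i : Nat) : Int) ≠ (i : Int) := by
          intro hc; exact hne (by exact_mod_cast hc)
        rw [pvCycleLoopA]
        simp only [pvPutstring, hstep]
        rw [if_pos hnez]
        obtain ⟨h1, ⟨e, he, hee⟩, h3⟩ := ih (t+1) fu
          (s ++ PySem.Int.toChars (((pvF perm)^[t] i : Nat) : Int) ++ [' '])
          (c + il + 1) (PySem.List.pySetD w (((pvF perm)^[t] i : Nat) : Int) 1)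
          ((PySem.Int.toChars (((pvF perm)^[t+1] i : Nat) : Int)).length : Int)
          (by omega) (by omega) (by omega)
        have hfun : ((fun s' => (pvF perm)^[t+s'] i) ∘ Nat.succ)
            = fun s' => (pvF perm)^[t+1+s'] i := by
          funext s'
          rw [Function.comp_apply, show t + Nat.succ s' = t + 1 + s' by omega]
        refine ⟨?_, ⟨il + 1 + e, ?_, by omega⟩, ?_⟩
        · rw [h1]
          simp only [List.range_succ_eq_map, List.map_cons, List.map_map, hfun, Nat.add_zero]
          rw [pvJoinCons _ _ _ (by simp [List.range_eq_nil]; omega)]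
          simp [List.append_assoc]
        · rw [he]; ring
        · rw [h3]
          simp only [List.range_succ_eq_map, List.map_cons, List.map_map, hfun, Nat.add_zero,
            List.foldl_cons]

-- marking a list of (in-range) indices: effect on reads and on length
theorem pvMarkLen (ks : List Nat) (w : List Int) :
    (ks.foldl (fun w (k : Nat) => PySem.List.pySetD w (k : Int) 1) w).length = w.length := by
  induction ks generalizing w with
  | nil => rfl
  | cons k t ih => rw [List.foldl_cons, ih]; simp [PySem.List.pySetD_natCast]

theorem pvMarkGet (ks : List Nat) (w : List Int) (hks : ∀ k ∈ ks, k < w.length) (q : Nat)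
    (hq : q < w.length) :
    PySem.List.pyGetD (ks.foldl (fun w (k : Nat) => PySem.List.pySetD w (k : Int) 1) w) (q : Int) 0
      = if q ∈ ks then 1 else PySem.List.pyGetD w (q : Int) 0 := by
  induction ks generalizing w with
  | nil => simp
  | cons k t ih =>
    simp only [List.foldl_cons]
    have hk : k < w.length := hks k List.mem_cons_self
    have hlen : (PySem.List.pySetD w (k : Int) 1).length = w.length := by
      simp [PySem.List.pySetD_natCast]
    rw [ih _ (by intro x hx; rw [hlen]; exact hks x (List.mem_cons_of_mem _ hx)) (by omega)]
    rw [PySem.List.pyGetD_pySetD_natCast w k q 1 0 hk]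
    by_cases hqt : q ∈ t
    · simp [hqt]
    · by_cases hqk : q = k
      · simp [hqk]
      · simp [hqt, hqk]

-- foldl of the Int-min step over casts of naturals
theorem pvFoldlMin_cast (l : List Nat) (a : Nat) :
    (l.map (fun k : Nat => (k : Int))).foldl (fun m x => if x < m then x else m) (a : Int)
      = ((l.foldl Nat.min a : Nat) : Int) := by
  induction l generalizing a with
  | nil => simp
  | cons x t ih =>
    simp only [List.map_cons, List.foldl_cons]
    have : (if (x : Int) < (a : Int) then (x : Int) else (a : Int)) = ((Nat.min a x : Nat) : Int) := by
      simp only [Nat.min_def]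
      split_ifs <;> simp_all <;> omega
    rw [this, ih]

def pvInv (perm : List Int) (N : Nat) (good : pvGood perm N) (j : Nat) (w : List Int) : Prop :=
  w.length = N ∧ ∀ k (hk : k < N),
    PySem.List.pyGetD w (k : Int) 0 =
      if pvF perm k ≠ k ∧ pvMin perm k (pvRet_of perm N good k hk) < j then 1 else 0

theorem pvInv_succ_no_emit (perm : List Int) (N : Nat) (good : pvGood perm N) (j : Nat)
    (hj : j < N)
    (hno : pvF perm j = j ∨ pvMin perm j (pvRet_of perm N good j hj) < j)
    (w : List Int) (hinv : pvInv perm N good j w) : pvInv perm N good (j+1) w := by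
  refine ⟨hinv.1, fun k hk => ?_⟩
  rw [hinv.2 k hk]
  have hcond : (pvF perm k ≠ k ∧ pvMin perm k (pvRet_of perm N good k hk) < j + 1) ↔
      (pvF perm k ≠ k ∧ pvMin perm k (pvRet_of perm N good k hk) < j) := by
    constructor
    · rintro ⟨hne, hlt⟩
      refine ⟨hne, ?_⟩
      rcases Nat.lt_or_ge (pvMin perm k (pvRet_of perm N good k hk)) j with hlt' | hge
      · exact hlt'
      · exfalso
        have hmj : pvMin perm k (pvRet_of perm N good k hk) = j := by omega
        have hjmem : j ∈ pvOrb perm k (pvRet_of perm N good k hk) := by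
          rw [← hmj]; exact pvMin_mem perm k _
        rcases hno with hfix | hlt2
        · exact pvNontriv perm N good k hk _ hne j hjmem (pvRet_of perm N good j hj) hfix
        · have := pvMin_eq_of_mem perm N good k hk _ j hjmem (pvRet_of perm N good j hj)
          omega
    · rintro ⟨hne, hlt⟩; exact ⟨hne, by omega⟩
  by_cases hc : pvF perm k ≠ k ∧ pvMin perm k (pvRet_of perm N good k hk) < j
  · rw [if_pos hc, if_pos (hcond.mpr hc)]
  · rw [if_neg hc, if_neg (fun hx => hc (hcond.mp hx))]

theorem pvInv_succ_emit (perm : List Int) (N : Nat) (good : pvGood perm N) (j : Nat)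
    (hj : j < N) (hne : pvF perm j ≠ j)
    (hm : pvMin perm j (pvRet_of perm N good j hj) = j)
    (w : List Int) (hinv : pvInv perm N good j w) :
    pvInv perm N good (j+1)
      ((pvOrb perm j (pvRet_of perm N good j hj)).foldl
        (fun w (k : Nat) => PySem.List.pySetD w (k : Int) 1) w) := by
  have hret := pvRet_of perm N good j hj
  have hks : ∀ k ∈ pvOrb perm j hret, k < w.length := by
    intro k hk; rw [hinv.1]; exact pvOrb_lt perm N good j hj hret k hk
  refine ⟨by rw [pvMarkLen, hinv.1], fun k hk => ?_⟩
  rw [pvMarkGet _ _ hks k (by rw [hinv.1]; exact hk)]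
  by_cases hmem : k ∈ pvOrb perm j hret
  · rw [if_pos hmem, if_pos]
    refine ⟨pvNontriv perm N good j hj hret hne k hmem (pvRet_of perm N good k hk), ?_⟩
    have := (pvMem_orb_iff_min perm N good j hj hret hm k hk (pvRet_of perm N good k hk)).mp hmem
    omega
  · rw [if_neg hmem, hinv.2 k hk]
    have hcond : (pvF perm k ≠ k ∧ pvMin perm k (pvRet_of perm N good k hk) < j + 1) ↔
        (pvF perm k ≠ k ∧ pvMin perm k (pvRet_of perm N good k hk) < j) := by
      constructor
      · rintro ⟨hne', hlt⟩
        refine ⟨hne', ?_⟩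
        rcases Nat.lt_or_ge (pvMin perm k (pvRet_of perm N good k hk)) j with hlt' | hge
        · exact hlt'
        · exfalso
          have hmj : pvMin perm k (pvRet_of perm N good k hk) = j := by omega
          exact hmem ((pvMem_orb_iff_min perm N good j hj hret hm k hk
            (pvRet_of perm N good k hk)).mpr hmj)
      · rintro ⟨hne', hlt⟩; exact ⟨hne', by omega⟩
    by_cases hc : pvF perm k ≠ k ∧ pvMin perm k (pvRet_of perm N good k hk) < j
    · rw [if_pos hc, if_pos (hcond.mpr hc)]
    · rw [if_neg hc, if_neg (fun hx => hc (hcond.mp hx))]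

theorem pvOrb_head (perm : List Int) (i : Nat) (h : pvRet perm i) :
    pvOrb perm i h = i :: (List.range (pvPer perm i h - 1)).map (fun s => (pvF perm)^[1+s] i) := by
  have hpos := pvPer_pos perm i h
  conv_lhs => rw [pvOrb, show pvPer perm i h = (pvPer perm i h - 1) + 1 by omega]
  rw [List.range_succ_eq_map, List.map_cons, List.map_map]
  simp only [Function.iterate_zero_apply]
  congr 1
  apply List.map_congr_left
  intro a _
  simp only [Function.comp_apply]
  rw [show Nat.succ a = 1 + a by omega]

theorem pvWalkB_call (perm : List Int) (n : Int) (good : pvGood perm n.toNat) (j : Nat)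
    (hj : j < n.toNat) (h : pvRet perm j) (hne : pvF perm j ≠ j) :
    pvWalkB perm (j : Int) (n.toNat + 1) ([(j : Int)], (j : Int), pvPermGetB perm (j : Int))
      = ((pvOrb perm j h).map (fun k : Nat => (k : Int)),
         ((pvMin perm j h : Nat) : Int), (j : Int)) := by
  have hper2 : 2 ≤ pvPer perm j h := by
    have h1 := pvPer_pos perm j h
    have h2 : pvPer perm j h ≠ 1 := fun hc => hne ((pvPer_one_iff perm j h).mp hc)
    omega
  have hperle := pvPer_le perm n.toNat good j hj h
  have hg : pvPermGetB perm (j : Int) = (((pvF perm)^[1] j : Nat) : Int) := by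
    rw [show pvPermGetB = pvPermGetA from rfl, pvGet_cast perm n.toNat good j hj,
      Function.iterate_one]
  rw [hg, pvWalkB_spec perm n.toNat good j hj h (pvPer perm j h - 1) 1 (n.toNat + 1) _ _
    (by omega) (by omega) (by omega)]
  have hmap : (List.range (pvPer perm j h - 1)).map (fun s => (((pvF perm)^[1+s] j : Nat) : Int))
      = ((List.range (pvPer perm j h - 1)).map (fun s => (pvF perm)^[1+s] j)).map
        (fun k : Nat => (k : Int)) := by
    rw [List.map_map]; rfl
  refine congrArg₂ _ ?_ (congrArg₂ _ ?_ rfl)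
  · rw [hmap, pvOrb_head perm j h, List.map_cons, List.singleton_append]
  · rw [hmap, pvFoldlMin_cast]
    have : pvMin perm j h = (List.foldl Nat.min j
        ((List.range (pvPer perm j h - 1)).map (fun s => (pvF perm)^[1+s] j))) := by
      rw [pvMin, pvOrb_head perm j h, List.foldl_cons, show Nat.min j j = j by simp [Nat.min_def]]
    rw [this]

theorem pvCycleA_call (perm : List Int) (n : Int) (good : pvGood perm n.toNat) (j : Nat)
    (hj : j < n.toNat) (h : pvRet perm j) (hne : pvF perm j ≠ j)
    (s : List Char) (c : Int) (w : List Int) :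
    (pvCycleLoopA perm (j : Int) (n.toNat + 1)
        (s, c, w, ((PySem.Int.toChars (j : Int)).length : Int), (j : Int))).1 =
      s ++ PySem.Chars.join [' ']
        ((pvOrb perm j h).map (fun k : Nat => PySem.Int.toChars (k : Int))) ∧
    (∃ e : Int, (pvCycleLoopA perm (j : Int) (n.toNat + 1)
        (s, c, w, ((PySem.Int.toChars (j : Int)).length : Int), (j : Int))).2.1 = c + e ∧ 1 ≤ e) ∧
    (pvCycleLoopA perm (j : Int) (n.toNat + 1)
        (s, c, w, ((PySem.Int.toChars (j : Int)).length : Int), (j : Int))).2.2.1 =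
      (pvOrb perm j h).foldl (fun w (k : Nat) => PySem.List.pySetD w (k : Int) 1) w := by
  have hpos := pvPer_pos perm j h
  have hperle := pvPer_le perm n.toNat good j hj h
  have hj0 : ((j : Nat) : Int) = (((pvF perm)^[0] j : Nat) : Int) := by simp
  obtain ⟨h1, ⟨e, he, hee⟩, h3⟩ := pvCycleLoopA_spec perm n.toNat good j hj h (pvPer perm j h) 0
    (n.toNat + 1) s c w ((PySem.Int.toChars (j : Int)).length : Int)
    (by omega) (by omega) (by omega)
  have horb : (List.range (pvPer perm j h)).map (fun s' => (pvF perm)^[0+s'] j)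
      = pvOrb perm j h := by
    rw [pvOrb]
    simp [Nat.zero_add]
  rw [hj0] at h1 he h3 ⊢
  refine ⟨by rw [h1, horb], ⟨e, by rw [he], by omega⟩, by rw [h3, horb]⟩

theorem pvStep_both (perm : List Int) (n : Int) (good : pvGood perm n.toNat) (j : Nat)
    (hj : j < n.toNat) (s : List Char) (c : Int) (w : List Int) (out : List (List Char))
    (hinv : pvInv perm n.toNat good j w) (hs : s = out.flatten) (hc0 : 0 ≤ c)
    (hce : c = 0 ↔ out = []) :
    pvInv perm n.toNat good (j+1) (pvStepA perm n (s, c, w) (j : Int)).2.2 ∧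
    (pvStepA perm n (s, c, w) (j : Int)).1 = (pvStepB perm n out (j : Int)).flatten ∧
    0 ≤ (pvStepA perm n (s, c, w) (j : Int)).2.1 ∧
    ((pvStepA perm n (s, c, w) (j : Int)).2.1 = 0 ↔ pvStepB perm n out (j : Int) = []) := by
  have hret := pvRet_of perm n.toNat good j hj
  have hgA : pvPermGetA perm (j : Int) = ((pvF perm j : Nat) : Int) :=
    pvGet_cast perm n.toNat good j hj
  by_cases hfix : pvF perm j = j
  · -- perm[j] == j : both sides skip
    have hA : ¬ (PySem.List.pyGetD w (j : Int) 0 = 0 ∧ pvPermGetA perm (j : Int) ≠ (j : Int)) := by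
      rintro ⟨-, hne⟩
      exact hne (by rw [hgA, hfix])
    have hB : ¬ pvPermGetB perm (j : Int) ≠ (j : Int) := by
      intro hne
      exact hne (by rw [show pvPermGetB = pvPermGetA from rfl, hgA, hfix])
    rw [pvStepA, if_neg hA, pvStepB, if_neg hB]
    exact ⟨pvInv_succ_no_emit perm n.toNat good j hj (Or.inl hfix) w hinv, hs, hc0, hce⟩
  · have hnez : pvPermGetA perm (j : Int) ≠ (j : Int) := by
      rw [hgA]
      intro hc
      exact hfix (by exact_mod_cast hc)
    have hnezB : pvPermGetB perm (j : Int) ≠ (j : Int) := by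
      rw [show pvPermGetB = pvPermGetA from rfl]; exact hnez
    have hwalk := pvWalkB_call perm n good j hj hret hfix
    by_cases hmin : pvMin perm j hret = j
    · -- emit on both sides
      have hA : PySem.List.pyGetD w (j : Int) 0 = 0 ∧ pvPermGetA perm (j : Int) ≠ (j : Int) := by
        refine ⟨?_, hnez⟩
        rw [hinv.2 j hj, if_neg]
        rintro ⟨-, hlt⟩
        omega
      obtain ⟨h1, ⟨e, he, hee⟩, h3⟩ :=
        pvCycleA_call perm n good j hj hret hfix (pvPutstring s ['(']) (c + 1) w
      rw [pvStepA, if_pos hA, pvStepB, if_pos hnezB, hwalk]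
      dsimp only
      rw [if_pos (by exact_mod_cast congrArg (fun x : Nat => (x : Int)) hmin)]
      refine ⟨?_, ?_, ?_, ?_⟩
      · rw [h3]
        exact pvInv_succ_emit perm n.toNat good j hj hfix hmin w hinv
      · rw [h1]
        simp only [pvPutstring, pvCycleStrB, List.flatten_append, List.flatten_cons,
          List.flatten_nil, List.map_map, List.append_assoc, List.append_nil, hs]
        rfl
      · rw [he]; omega
      · rw [he]
        constructor
        · intro hc; omega
        · intro hc; simp at hc
    · -- j's cycle was already printed (its minimum is < j): both sides skip
      have hlt : pvMin perm j hret < j := by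
        have := pvMin_le_self perm j hret
        omega
      have hA : ¬ (PySem.List.pyGetD w (j : Int) 0 = 0 ∧ pvPermGetA perm (j : Int) ≠ (j : Int)) := by
        rintro ⟨h0, -⟩
        rw [hinv.2 j hj, if_pos ⟨hfix, hlt⟩] at h0
        exact one_ne_zero h0
      rw [pvStepA, if_neg hA, pvStepB, if_pos hnezB, hwalk]
      dsimp only
      rw [if_neg (by intro hc; exact hmin (by exact_mod_cast hc))]
      exact ⟨pvInv_succ_no_emit perm n.toNat good j hj (Or.inr hlt) w hinv, hs, hc0, hce⟩

theorem pvOuter (perm : List Int) (n : Int) (good : pvGood perm n.toNat) :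
    ∀ d j, j + d = n.toNat → ∀ (s : List Char) (c : Int) (w : List Int) (out : List (List Char)),
    pvInv perm n.toNat good j w → s = out.flatten → 0 ≤ c → (c = 0 ↔ out = []) →
    ((PySem.List.pyRange (j : Int) n 1).foldl (pvStepA perm n) (s, c, w)).1 =
      ((PySem.List.pyRange (j : Int) n 1).foldl (pvStepB perm n) out).flatten ∧
    0 ≤ ((PySem.List.pyRange (j : Int) n 1).foldl (pvStepA perm n) (s, c, w)).2.1 ∧
    (((PySem.List.pyRange (j : Int) n 1).foldl (pvStepA perm n) (s, c, w)).2.1 = 0 ↔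
      (PySem.List.pyRange (j : Int) n 1).foldl (pvStepB perm n) out = []) := by
  intro d
  induction d with
  | zero =>
    intro j hj s c w out hinv hs hc0 hce
    rw [PySem.List.pyRange_one_eq_nil (by omega)]
    exact ⟨hs, hc0, hce⟩
  | succ d ih =>
    intro j hj s c w out hinv hs hc0 hce
    rw [PySem.List.pyRange_one_cons (by omega)]
    simp only [List.foldl_cons]
    obtain ⟨hinv', hs', hc0', hce'⟩ :=
      pvStep_both perm n good j (by omega) s c w out hinv hs hc0 hce
    have hcast : ((j : Int) + 1) = ((j + 1 : Nat) : Int) := by push_cast; ring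
    have := ih (j+1) (by omega)
      (pvStepA perm n (s, c, w) (j : Int)).1
      (pvStepA perm n (s, c, w) (j : Int)).2.1
      (pvStepA perm n (s, c, w) (j : Int)).2.2
      (pvStepB perm n out (j : Int)) hinv' hs' hc0' hce'
    rw [hcast]
    exact this

theorem pvInitW (n : Int) :
    (PySem.List.pyRange (n-1) (-1) (-1)).foldl (fun w i => PySem.List.pySetD w i 0)
      (List.replicate n.toNat 0) = List.replicate n.toNat (0 : Int) := by
  have : ∀ (L : List Int), (∀ x ∈ L, 0 ≤ x) →
      L.foldl (fun w i => PySem.List.pySetD w i 0) (List.replicate n.toNat 0)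
        = List.replicate n.toNat (0 : Int) := by
    intro L
    induction L with
    | nil => intro _; rfl
    | cons x t ihL =>
      intro hL
      rw [List.foldl_cons, PySem.List.pySetD_of_nonneg _ _ (hL x List.mem_cons_self),
        List.set_replicate_self]
      exact ihL (fun y hy => hL y (List.mem_cons_of_mem _ hy))
  apply this
  intro x hx
  rw [PySem.List.mem_pyRange_neg_one] at hx
  omega

theorem pvInv_zero (perm : List Int) (n : Int) (good : pvGood perm n.toNat) :
    pvInv perm n.toNat good 0 (List.replicate n.toNat (0 : Int)) := by
  refine ⟨by simp, fun k hk => ?_⟩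
  rw [if_neg (by rintro ⟨-, hlt⟩; omega)]
  rw [PySem.List.pyGetD_natCast]
  rcases Nat.lt_or_ge k n.toNat with h | h
  · simp [List.getD_eq_getElem?_getD, h]
  · simp [List.getD_eq_getElem?_getD, Nat.not_lt.mpr h]

theorem pvJoinNilFlatten (parts : List (List Char)) :
    PySem.Chars.join [] parts = parts.flatten := by
  induction parts with
  | nil => simp [PySem.Chars.join_nil]
  | cons p rest ih =>
    cases rest with
    | nil => simp [PySem.Chars.join_singleton]
    | cons q r =>
      rw [PySem.Chars.join_cons_cons]
      simp [ih]

theorem pvMain (perm : List Int) (n : Int) (hpre : Pre_writeperm perm n) :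
    writeperm perm n = writeperm_alt perm n := by
  have good := pvPre_good perm n hpre
  unfold writeperm writeperm_alt
  dsimp only
  rw [pvInitW]
  have hcast0 : ((0 : Nat) : Int) = (0 : Int) := by norm_num
  obtain ⟨h1, h2, h3⟩ := pvOuter perm n good n.toNat 0 (by omega) [] 0
    (List.replicate n.toNat 0) [] (pvInv_zero perm n good) rfl (le_refl 0) (by simp)
  rw [hcast0] at h1 h2 h3
  by_cases hc : ((PySem.List.pyRange 0 n 1).foldl (pvStepA perm n)
      ([], 0, List.replicate n.toNat 0)).2.1 = 0
  · rw [if_pos hc]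
    have hout : (PySem.List.pyRange 0 n 1).foldl (pvStepB perm n) [] = [] := h3.mp hc
    rw [hout]
    have : ((PySem.List.pyRange 0 n 1).foldl (pvStepA perm n)
        ([], 0, List.replicate n.toNat 0)).1 = [] := by rw [h1, hout]; rfl
    rw [this]
    simp [pvPutstring]
  · rw [if_neg hc]
    have hout : (PySem.List.pyRange 0 n 1).foldl (pvStepB perm n) [] ≠ [] :=
      fun hx => hc (h3.mpr hx)
    have hie : ((PySem.List.pyRange 0 n 1).foldl (pvStepB perm n) []).isEmpty = false := by
      rw [List.isEmpty_eq_false_iff]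
      exact hout
    rw [hie, if_neg (by simp)]
    rw [h1, pvJoinNilFlatten]
    rfl

-- ===== VERDICT (by name: the statement is the Claim_ definition above) =====
theorem writeperm_spec : Claim_equal_writeperm := by
  intro perm n _ hpre
  unfold Spec_writeperm
  exact pvMain perm n hpre
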